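-- pv_equiv track=rewrite | github.com/petersaalbrink/apollo | address_checker/Address_Parsers/address_parser.py | clean_ext
-- ===== SOURCE A (Python) =====
-- import string
--
-- def hasLetters(input):
--     return any(char in string.ascii_letters for char in input)
--
-- def clean_ext(input):
--     for el in string.punctuation:
--         if el in input:
--             input = input.replace(el, '')
--     if len(input)>2 and input.isalpha():
--         input = ''
--     elif len(input)>3 and input.isdigit():
--         input = ''
--     elif len(input)>3 and hasLetters(input):
--         input = ''
--     return input
-- ===== SOURCE B (Python) =====
-- import string
--
-- _PUNCT = set(string.punctuation)
--
-- def hasLetters(input):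
--     return any(char in string.ascii_letters for char in input)
--
-- def clean_ext(input):
--     cleaned = ''.join(c for c in input if c not in _PUNCT)
--     if len(cleaned) > 2 and cleaned.isalpha():
--         return ''
--     if len(cleaned) > 3 and (cleaned.isdigit() or hasLetters(cleaned)):
--         return ''
--     return cleaned
-- ===== Notes on version B (the rewrite author's own statement) =====
-- stated objective: idiomatic
-- what changed: B strips punctuation in a single pass over the input (filter against a precomputed punctuation set) instead of A's 32 successive contains-then-replace rescans of the whole string, and merges the two len>3 blanking branches into one.
import Mathlib
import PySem

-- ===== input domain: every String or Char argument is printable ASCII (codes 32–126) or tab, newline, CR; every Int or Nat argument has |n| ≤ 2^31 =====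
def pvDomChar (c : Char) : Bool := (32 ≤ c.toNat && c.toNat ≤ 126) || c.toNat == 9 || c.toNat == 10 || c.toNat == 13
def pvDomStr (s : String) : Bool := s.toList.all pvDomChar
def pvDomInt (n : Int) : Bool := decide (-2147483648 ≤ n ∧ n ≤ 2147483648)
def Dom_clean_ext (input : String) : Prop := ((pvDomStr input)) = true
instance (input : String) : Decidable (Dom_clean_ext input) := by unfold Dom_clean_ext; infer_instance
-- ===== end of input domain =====

-- B strips punctuation in one pass over the input (filter by a punctuation set) instead of
-- A's per-punctuation-character contains/replace rescans; return values are identical.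

-- string.punctuation
def pyPunct : List Char := "!\"#$%&'()*+,-./:;<=>?@[\\]^_`{|}~".toList
-- string.ascii_letters
def pyLetters : List Char := "abcdefghijklmnopqrstuvwxyzABCDEFGHIJKLMNOPQRSTUVWXYZ".toList

-- helper hasLetters (used by both Pythons): any(char in string.ascii_letters for char in input)
def hasLettersL (input : List Char) : Bool := input.any (fun c => pyLetters.contains c)

-- ===== PORT A =====
def clean_ext (input : String) : String :=
  let cleaned := pyPunct.foldl
    (fun s el => if PySem.Chars.isIn [el] s then PySem.Chars.replace s [el] [] else s)
    input.toList
  let r :=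
    if 2 < PySem.Chars.len cleaned ∧ PySem.Chars.strIsalpha cleaned then ([] : List Char)
    else if 3 < PySem.Chars.len cleaned ∧ PySem.Chars.strIsdigit cleaned then []
    else if 3 < PySem.Chars.len cleaned ∧ hasLettersL cleaned then []
    else cleaned
  String.ofList r

-- ===== PORT B =====
-- _PUNCT = set(string.punctuation)
def pyPunctSet : PySem.Set Char := PySem.Set.ofList pyPunct

def clean_ext_alt (input : String) : String :=
  let cleaned := input.toList.filter (fun c => !(PySem.Set.contains pyPunctSet c))
  if 2 < PySem.Chars.len cleaned ∧ PySem.Chars.strIsalpha cleaned then ""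
  else if 3 < PySem.Chars.len cleaned ∧ (PySem.Chars.strIsdigit cleaned || hasLettersL cleaned) then ""
  else String.ofList cleaned

-- ===== PRECONDITION & SPEC =====
def Spec_clean_ext (input : String) (out : String) : Prop := out = clean_ext_alt input
instance (input : String) (out : String) : Decidable (Spec_clean_ext input out) := by unfold Spec_clean_ext; infer_instance

-- ===== CLAIM (what is proved, stated in full; the proofs are below) =====
def Claim_equal_clean_ext : Prop := ∀ (input : String), Dom_clean_ext input → Spec_clean_ext input (clean_ext input)

-- ===== LEMMAS AND PROOFS =====

-- replace.go with a single-char pattern and empty replacement is a filter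
lemma replace_go_single (p : Char) :
    ∀ (l : List Char) (fuel : Nat) (acc : List Char), l.length ≤ fuel →
      PySem.Chars.replace.go [p] [] fuel l acc = acc.reverse ++ l.filter (fun c => c != p) := by
  intro l
  induction l with
  | nil =>
    intro fuel acc _
    cases fuel <;> simp [PySem.Chars.replace.go]
  | cons c t ih =>
    intro fuel acc h
    cases fuel with
    | zero => simp at h
    | succ f =>
      simp only [PySem.Chars.replace.go, List.isPrefixOf]
      by_cases hc : p = c
      · subst hc
        simp [ih f acc (by simpa using h)]
      · have hpc : (p == c) = false := by simp [hc]
        have hcp : (c == p) = false := by simp [Ne.symm hc]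
        simp only [hpc, Bool.false_and, Bool.false_eq_true, if_false]
        rw [ih f (c :: acc) (by simpa using h)]
        simp [List.filter, bne, hcp]

-- s.replace(p, '') for a single character p filters p out of s
lemma replace_single (s : List Char) (p : Char) :
    PySem.Chars.replace s [p] [] = s.filter (fun c => c != p) := by
  simp only [PySem.Chars.replace, List.isEmpty]
  exact replace_go_single p s s.length [] (le_refl _)

-- A's per-character body (contains-guarded replace) is that same filter
lemma step_single (s : List Char) (p : Char) :
    (if PySem.Chars.isIn [p] s then PySem.Chars.replace s [p] [] else s)
      = s.filter (fun c => c != p) := by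
  by_cases h : PySem.Chars.isIn [p] s = true
  · simp [h, replace_single]
  · have hnin : p ∉ s := by
      intro hmem
      apply h
      rw [PySem.Chars.isIn_iff_infix]
      obtain ⟨l₁, l₂, rfl⟩ := List.mem_iff_append.mp hmem
      exact ⟨l₁, l₂, by simp⟩
    simp only [h]
    symm
    apply List.filter_eq_self.mpr
    intro a ha
    simp [bne]
    rintro rfl; exact hnin ha

-- folding single-character filters over a list of characters filters by membership
lemma foldl_filter (ps : List Char) :
    ∀ s : List Char,
      ps.foldl (fun s p => s.filter (fun c => c != p)) s
        = s.filter (fun c => !ps.contains c) := by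
  induction ps with
  | nil => intro s; simp
  | cons p t ih =>
    intro s
    simp only [List.foldl_cons, ih, List.filter_filter]
    apply List.filter_congr
    intro c _
    simp only [bne, List.contains_cons, Bool.not_or]
    first | rfl | exact Bool.and_comm _ _

-- the cleaning loops agree
lemma cleaned_eq (input : String) :
    pyPunct.foldl
      (fun s el => if PySem.Chars.isIn [el] s then PySem.Chars.replace s [el] [] else s)
      input.toList
    = input.toList.filter (fun c => !(PySem.Set.contains pyPunctSet c)) := by
  have h1 : pyPunct.foldl
      (fun s el => if PySem.Chars.isIn [el] s then PySem.Chars.replace s [el] [] else s)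
      input.toList
    = pyPunct.foldl (fun s p => s.filter (fun c => c != p)) input.toList := by
    apply PySem.List.foldl_congr_mem
    intro acc x _
    exact step_single acc x
  rw [h1, foldl_filter]
  apply List.filter_congr
  intro c _
  have h2 : PySem.Set.contains pyPunctSet c = pyPunct.contains c := by
    by_cases h : c ∈ pyPunct
    · simp [PySem.Set.contains_eq_listContains, pyPunctSet, h,
        (PySem.Set.mem_ofList pyPunct c).mpr h]
    · simp [PySem.Set.contains_eq_listContains, pyPunctSet, h, PySem.Set.mem_ofList pyPunct c]
  rw [h2]

-- ===== VERDICT (by name: the statement is the Claim_ definition above) =====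
theorem clean_ext_spec : Claim_equal_clean_ext := by
  intro input _
  unfold Spec_clean_ext clean_ext clean_ext_alt
  rw [cleaned_eq]
  set cl := input.toList.filter (fun c => !(PySem.Set.contains pyPunctSet c)) with hcl
  dsimp only
  split_ifs <;>
    first
      | rfl
      | (exfalso
         rename_i hna hd hno
         exact hno ⟨hd.1, Bool.or_eq_true_iff.mpr (Or.inl hd.2)⟩)
      | (exfalso
         rename_i hna hnd hh hno
         exact hno ⟨hh.1, Bool.or_eq_true_iff.mpr (Or.inr hh.2)⟩)
      | (exfalso
         rename_i hna hnd hnh ho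
         rcases ho with ⟨hl, hor⟩
         rcases Bool.or_eq_true_iff.mp hor with hd | he
         · exact hnd ⟨hl, hd⟩
         · exact hnh ⟨hl, he⟩)
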